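-- pv_equiv track=rewrite | github.com/matthart97/MatSciCuration_TBV | Curation/Polymers/PSMILES_Correction.py | move_second_asterisk
-- ===== SOURCE A (Python) =====
-- def move_second_asterisk(s):
--     count = 0
--     for i, char in enumerate(s):
--         if char == '*':
--             count += 1
--             if count == 2:
--                 new_s = s[:i] + s[i+1:] + '*'
--                 return new_s
--     return s
-- ===== SOURCE B (Python) =====
-- def move_second_asterisk(s):
--     parts = s.split('*', 2)
--     if len(parts) < 3:
--         return s
--     return parts[0] + '*' + parts[1] + parts[2] + '*'
-- ===== Notes on version B (the rewrite author's own statement) =====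
-- stated objective: idiomatic
-- what changed: Replaced the character-by-character enumerate/count scan with a segment decomposition: splitting the string at the first two asterisks (maxsplit 2) and reassembling the three segments with the second separator moved to the end.
import Mathlib
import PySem

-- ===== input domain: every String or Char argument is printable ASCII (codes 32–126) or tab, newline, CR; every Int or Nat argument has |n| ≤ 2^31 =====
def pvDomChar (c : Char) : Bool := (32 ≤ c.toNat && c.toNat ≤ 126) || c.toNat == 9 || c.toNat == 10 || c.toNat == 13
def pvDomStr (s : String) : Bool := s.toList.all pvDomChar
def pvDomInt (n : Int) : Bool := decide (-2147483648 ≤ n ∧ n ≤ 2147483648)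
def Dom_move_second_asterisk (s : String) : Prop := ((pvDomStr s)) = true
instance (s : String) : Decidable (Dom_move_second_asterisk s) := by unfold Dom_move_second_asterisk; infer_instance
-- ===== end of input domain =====

-- B replaces A's character-by-character enumerate/count scan with a segment decomposition
-- via s.split('*', 2) (idiomatic; same O(n) cost).

-- ===== PORT A =====
-- the for-loop over enumerate(s) with the running asterisk count and early return
def msaGo (s : String) : List (Int × Char) → Int → String
  | [], _ => s
  | (i, c) :: rest, count =>
    if c = '*' then
      if count + 1 = 2 then
        PySem.Str.slice s none (some i) ++ PySem.Str.slice s (some (i + 1)) none ++ "*"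
      else msaGo s rest (count + 1)
    else msaGo s rest count

def move_second_asterisk (s : String) : String :=
  msaGo s (PySem.List.enumerate s.toList 0) 0

-- ===== PORT B =====
def move_second_asterisk_alt (s : String) : String :=
  match PySem.Str.splitMax? s "*" 2 with
  | none => s          -- unreachable: the separator "*" is nonempty
  | some parts =>
    if parts.length < 3 then s
    else parts.getD 0 "" ++ "*" ++ parts.getD 1 "" ++ parts.getD 2 "" ++ "*"
    -- the three indexings are in range since parts.length ≥ 3

-- ===== PRECONDITION & SPEC =====
def Spec_move_second_asterisk (s : String) (out : String) : Prop := out = move_second_asterisk_alt s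
instance (s : String) (out : String) : Decidable (Spec_move_second_asterisk s out) := by unfold Spec_move_second_asterisk; infer_instance

-- ===== CLAIM (what is proved, stated in full; the proofs are below) =====
def Claim_equal_move_second_asterisk : Prop := ∀ (s : String), Dom_move_second_asterisk s → Spec_move_second_asterisk s (move_second_asterisk s)

-- ===== LEMMAS AND PROOFS =====

-- first occurrence decomposition
lemma first_star : ∀ (cs : List Char), '*' ∈ cs → ∃ u t, cs = u ++ '*' :: t ∧ '*' ∉ u := by
  intro cs h
  induction cs with
  | nil => cases h
  | cons c rest ih =>
    by_cases hc : c = '*'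
    · exact ⟨[], rest, by simp [hc], by simp⟩
    · have hr : '*' ∈ rest := by
        rcases List.mem_cons.mp h with h' | h'
        · exact absurd h'.symm hc
        · exact h'
      obtain ⟨u, t, he, hu⟩ := ih hr
      exact ⟨c :: u, t, by simp [he], by
        intro hm
        rcases List.mem_cons.mp hm with h' | h'
        · exact hc h'.symm
        · exact hu h'⟩

-- ===== A-side lemmas =====
lemma enum_no_star {u : List Char} (hu : '*' ∉ u) (n : Int) :
    ∀ p ∈ PySem.List.enumerate u n, p.2 ≠ '*' := by
  intro p hp
  rw [PySem.List.mem_enumerate_iff] at hp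
  obtain ⟨k, hk, rfl⟩ := hp
  intro h
  exact hu (h ▸ List.getElem_mem hk)

lemma msaGo_all (s : String) (ps : List (Int × Char)) (h : ∀ p ∈ ps, p.2 ≠ '*') (count : Int) :
    msaGo s ps count = s := by
  induction ps with
  | nil => rfl
  | cons p ps ih =>
    obtain ⟨i, c⟩ := p
    have hc : c ≠ '*' := h (i, c) (by simp)
    simp only [msaGo, if_neg hc]
    exact ih (fun q hq => h q (by simp [hq]))

lemma msaGo_skip (s : String) (ps rest : List (Int × Char)) (h : ∀ p ∈ ps, p.2 ≠ '*') (count : Int) :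
    msaGo s (ps ++ rest) count = msaGo s rest count := by
  induction ps with
  | nil => rfl
  | cons p ps ih =>
    obtain ⟨i, c⟩ := p
    have hc : c ≠ '*' := h (i, c) (by simp)
    simp only [List.cons_append, msaGo, if_neg hc]
    exact ih (fun q hq => h q (by simp [hq]))

lemma msaGo_cons_star (s : String) (i : Int) (rest : List (Int × Char)) (count : Int) :
    msaGo s ((i, '*') :: rest) count =
      if count + 1 = 2 then
        PySem.Str.slice s none (some i) ++ PySem.Str.slice s (some (i + 1)) none ++ "*"
      else msaGo s rest (count + 1) := by
  simp [msaGo]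

-- ===== B-side lemmas (behaviour of split('*', 2)) =====
lemma go_zero (m : Nat) (l cur : List Char) (acc : List (List Char)) :
    PySem.Chars.splitOnMax.go ['*'] 0 m l cur acc = ((cur.reverse ++ l) :: acc).reverse := rfl

lemma go_succ_nil (fuel m : Nat) (cur : List Char) (acc : List (List Char)) :
    PySem.Chars.splitOnMax.go ['*'] (fuel + 1) m [] cur acc = (cur.reverse :: acc).reverse := rfl

lemma go_succ_cons (fuel m : Nat) (c : Char) (rest cur : List Char) (acc : List (List Char)) :
    PySem.Chars.splitOnMax.go ['*'] (fuel + 1) m (c :: rest) cur acc =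
      if m = 0 then ((cur.reverse ++ c :: rest) :: acc).reverse
      else if List.isPrefixOf ['*'] (c :: rest) = true then
        PySem.Chars.splitOnMax.go ['*'] fuel (m - 1) (List.drop (List.length ['*']) (c :: rest)) [] (cur.reverse :: acc)
      else PySem.Chars.splitOnMax.go ['*'] fuel m rest (c :: cur) acc := rfl

lemma go_nil (fuel m : Nat) (cur : List Char) (acc : List (List Char)) :
    PySem.Chars.splitOnMax.go ['*'] fuel m [] cur acc = (cur.reverse :: acc).reverse := by
  cases fuel with
  | zero => simp [go_zero]
  | succ n => exact go_succ_nil n m cur acc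

lemma go_mzero (fuel : Nat) (l cur : List Char) (acc : List (List Char)) :
    PySem.Chars.splitOnMax.go ['*'] fuel 0 l cur acc = ((cur.reverse ++ l) :: acc).reverse := by
  cases fuel with
  | zero => exact go_zero 0 l cur acc
  | succ n =>
    cases l with
    | nil => simp [go_succ_nil]
    | cons c rest => simp [go_succ_cons]

lemma go_star (fuel m : Nat) (hm : m ≠ 0) (rest cur : List Char) (acc : List (List Char)) :
    PySem.Chars.splitOnMax.go ['*'] (fuel + 1) m ('*' :: rest) cur acc =
      PySem.Chars.splitOnMax.go ['*'] fuel (m - 1) rest [] (cur.reverse :: acc) := by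
  rw [go_succ_cons, if_neg hm]
  simp [List.isPrefixOf]

lemma go_skip (u : List Char) (hu : '*' ∉ u) (fuel m : Nat) (hm : m ≠ 0)
    (l cur : List Char) (acc : List (List Char)) :
    PySem.Chars.splitOnMax.go ['*'] (fuel + u.length) m (u ++ l) cur acc =
      PySem.Chars.splitOnMax.go ['*'] fuel m l (u.reverse ++ cur) acc := by
  induction u generalizing cur with
  | nil => simp
  | cons c u ih =>
    have hc : c ≠ '*' := fun h => hu (by simp [h])
    have hu' : '*' ∉ u := fun h => hu (by simp [h])
    rw [List.cons_append, List.length_cons, ← Nat.add_assoc, go_succ_cons, if_neg hm]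
    have hpre : List.isPrefixOf ['*'] (c :: (u ++ l)) = false := by
      simp [List.isPrefixOf]
      exact fun h => hc h.symm
    rw [hpre]
    simp only [Bool.false_eq_true, if_false]
    rw [ih hu' (c :: cur)]
    simp

lemma go_skip' (u : List Char) (hu : '*' ∉ u) (fuel m : Nat) (hm : m ≠ 0)
    (cur : List Char) (acc : List (List Char)) :
    PySem.Chars.splitOnMax.go ['*'] (fuel + u.length) m u cur acc =
      PySem.Chars.splitOnMax.go ['*'] fuel m [] (u.reverse ++ cur) acc := by
  have := go_skip u hu fuel m hm [] cur acc
  simpa using this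

lemma split_zero {cs : List Char} (h : '*' ∉ cs) :
    PySem.Chars.splitMax? cs ['*'] 2 = some [cs] := by
  rw [PySem.Chars.splitMax?]
  simp only [List.isEmpty_cons, Bool.false_eq_true, if_false]
  rw [PySem.Chars.splitOnMax, if_neg (by norm_num)]
  have h2 : (2 : Int).toNat = 2 := rfl
  rw [h2, Nat.add_comm, go_skip' cs h 1 2 (by decide), go_nil]
  simp

lemma split_one {u v : List Char} (hu : '*' ∉ u) (hv : '*' ∉ v) :
    PySem.Chars.splitMax? (u ++ '*' :: v) ['*'] 2 = some [u, v] := by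
  rw [PySem.Chars.splitMax?]
  simp only [List.isEmpty_cons, Bool.false_eq_true, if_false]
  rw [PySem.Chars.splitOnMax, if_neg (by norm_num)]
  have h2 : (2 : Int).toNat = 2 := rfl
  rw [h2]
  have hf : (u ++ '*' :: v).length + 1 = ((v.length + 1) + 1) + u.length := by
    simp [List.length_append]; omega
  rw [hf, go_skip u hu _ 2 (by decide), go_star _ 2 (by decide),
      Nat.add_comm v.length 1, go_skip' v hv 1 1 (by decide), go_nil]
  simp

lemma split_two {u v w : List Char} (hu : '*' ∉ u) (hv : '*' ∉ v) :
    PySem.Chars.splitMax? (u ++ '*' :: (v ++ '*' :: w)) ['*'] 2 = some [u, v, w] := by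
  rw [PySem.Chars.splitMax?]
  simp only [List.isEmpty_cons, Bool.false_eq_true, if_false]
  rw [PySem.Chars.splitOnMax, if_neg (by norm_num)]
  have h2 : (2 : Int).toNat = 2 := rfl
  rw [h2]
  have hf : (u ++ '*' :: (v ++ '*' :: w)).length + 1
      = (((((w.length + 1) + 1) + v.length) + 1)) + u.length := by
    simp [List.length_append]; omega
  rw [hf, go_skip u hu _ 2 (by decide), go_star _ 2 (by decide),
      go_skip v hv _ 1 (by decide), go_star _ 1 (by decide), go_mzero]
  simp

-- from the Chars-level split value to the Str-level one
lemma str_split_eq (s : String) (l : List (List Char))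
    (h : PySem.Chars.splitMax? s.toList ['*'] 2 = some l) :
    ∃ ps, PySem.Str.splitMax? s "*" 2 = some ps ∧ ps.map String.toList = l := by
  have hm := PySem.Str.splitMax?_map s "*" 2
  have hstar : ("*" : String).toList = ['*'] := rfl
  rw [hstar, h] at hm
  cases hps : PySem.Str.splitMax? s "*" 2 with
  | none => rw [hps] at hm; simp at hm
  | some ps =>
    rw [hps] at hm
    simp only [Option.map_some, Option.some.injEq] at hm
    exact ⟨ps, rfl, hm⟩

-- ===== VERDICT (by name: the statement is the Claim_ definition above) =====
theorem move_second_asterisk_spec : Claim_equal_move_second_asterisk := by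
  intro s _
  unfold Spec_move_second_asterisk
  by_cases h1 : '*' ∈ s.toList
  · obtain ⟨u, t, hcs, hu⟩ := first_star _ h1
    by_cases h2 : '*' ∈ t
    · obtain ⟨v, w, ht, hv⟩ := first_star _ h2
      subst ht
      -- two or more asterisks
      have hsplit : PySem.Chars.splitMax? s.toList ['*'] 2 = some [u, v, w] := by
        rw [hcs]; exact split_two hu hv
      obtain ⟨ps, hps, hmap⟩ := str_split_eq s _ hsplit
      rcases ps with _ | ⟨a, ps⟩; · simp at hmap
      rcases ps with _ | ⟨b, ps⟩; · simp at hmap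
      rcases ps with _ | ⟨c, ps⟩; · simp at hmap
      rcases ps with _ | ⟨d, ps⟩
      swap
      · simp at hmap
      simp only [List.map_cons, List.map_nil, List.cons.injEq, and_true] at hmap
      obtain ⟨ha, hb, hc⟩ := hmap
      have hB : move_second_asterisk_alt s = a ++ "*" ++ b ++ c ++ "*" := by
        simp [move_second_asterisk_alt, hps]
      rw [hB]
      unfold move_second_asterisk
      rw [hcs, PySem.List.enumerate_append, PySem.List.enumerate_cons,
          PySem.List.enumerate_append, PySem.List.enumerate_cons,
          msaGo_skip _ _ _ (enum_no_star hu _),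
          msaGo_cons_star, if_neg (by norm_num : ¬((0 : Int) + 1 = 2)),
          msaGo_skip _ _ _ (enum_no_star hv _),
          msaGo_cons_star, if_pos (by norm_num : ((0 : Int) + 1) + 1 = 2)]
      apply String.ext
      simp only [String.toList_append, PySem.Str.toList_slice, PySem.Chars.slice_eq_listSlice]
      rw [hcs]
      have hi : (0 + (u.length : Int) + 1 + (v.length : Int))
          = ((u.length + 1 + v.length : Nat) : Int) := by push_cast; ring
      rw [hi, PySem.List.slice_to_natCast]
      have hi2 : ((u.length + 1 + v.length : Nat) : Int) + 1
          = ((u.length + 1 + v.length + 1 : Nat) : Int) := by push_cast; ring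
      rw [hi2, PySem.List.slice_from_natCast]
      have htake : List.take (u.length + 1 + v.length) (u ++ '*' :: (v ++ '*' :: w))
          = u ++ '*' :: v := by
        rw [show u ++ '*' :: (v ++ '*' :: w) = (u ++ '*' :: v) ++ '*' :: w by simp]
        exact List.take_left' (by simp [List.length_append]; omega)
      have hdrop : List.drop (u.length + 1 + v.length + 1) (u ++ '*' :: (v ++ '*' :: w))
          = w := by
        rw [show u ++ '*' :: (v ++ '*' :: w) = ((u ++ '*' :: v) ++ ['*']) ++ w by simp]
        exact List.drop_left' (by simp [List.length_append]; omega)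
      rw [htake, hdrop, ha, hb, hc]
      simp
    · -- exactly one asterisk
      have hsplit : PySem.Chars.splitMax? s.toList ['*'] 2 = some [u, t] := by
        rw [hcs]; exact split_one hu h2
      obtain ⟨ps, hps, hmap⟩ := str_split_eq s _ hsplit
      have hlen : ps.length = 2 := by
        have := congrArg List.length hmap
        simpa using this
      have hB : move_second_asterisk_alt s = s := by
        simp [move_second_asterisk_alt, hps, hlen]
      rw [hB]
      unfold move_second_asterisk
      rw [hcs, PySem.List.enumerate_append, PySem.List.enumerate_cons,
          msaGo_skip _ _ _ (enum_no_star hu _),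
          msaGo_cons_star, if_neg (by norm_num : ¬((0 : Int) + 1 = 2)),
          msaGo_all _ _ (enum_no_star h2 _)]
  · -- no asterisk
    have hsplit : PySem.Chars.splitMax? s.toList ['*'] 2 = some [s.toList] :=
      split_zero h1
    obtain ⟨ps, hps, hmap⟩ := str_split_eq s _ hsplit
    have hlen : ps.length = 1 := by
      have := congrArg List.length hmap
      simpa using this
    have hB : move_second_asterisk_alt s = s := by
      simp [move_second_asterisk_alt, hps, hlen]
    rw [hB]
    exact msaGo_all _ _ (enum_no_star h1 _) _
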